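-- pv_equiv track=rewrite | github.com/progressivis/progressivis | progressivis/storage/hierarchy.py | normalize_storage_path
-- ===== SOURCE A (Python) =====
-- def normalize_storage_path(path: str) -> str:
--     if path:
--
--         # convert backslash to forward slash
--         path = path.replace("\\", "/")
--
--         # ensure no leading slash
--         while len(path) > 0 and path[0] == "/":
--             path = path[1:]
--
--         # ensure no trailing slash
--         while len(path) > 0 and path[-1] == "/":
--             path = path[:-1]
--
--         # collapse any repeated slashes
--         previous_char = None
--         collapsed = ""
--         for char in path:
--             if char == "/" and previous_char == "/":
--                 pass
--             else:
--                 collapsed += char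
--             previous_char = char
--         path = collapsed
--
--         # don't allow path segments with just '.' or '..'
--         segments = path.split("/")
--         if any([s in {".", ".."} for s in segments]):
--             raise ValueError("path containing '.' or '..' segment not allowed")
--
--     else:
--         path = ""
--
--     return path
-- ===== SOURCE B (Python) =====
-- def normalize_storage_path(path: str) -> str:
--     if not path:
--         return ""
--     parts = [s for s in path.replace("\\", "/").split("/") if s]
--     if any(s in (".", "..") for s in parts):
--         raise ValueError("path containing '.' or '..' segment not allowed")
--     return "/".join(parts)
-- ===== Notes on version B (the rewrite author's own statement) =====
-- stated objective: faster
-- what changed: Replaces A's two char-peeling while-loops (strip leading/trailing slashes) and the previous-char collapse state machine by one token-level pass: split on '/', drop empty tokens, check them, and re-join with '/'.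
import Mathlib
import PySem

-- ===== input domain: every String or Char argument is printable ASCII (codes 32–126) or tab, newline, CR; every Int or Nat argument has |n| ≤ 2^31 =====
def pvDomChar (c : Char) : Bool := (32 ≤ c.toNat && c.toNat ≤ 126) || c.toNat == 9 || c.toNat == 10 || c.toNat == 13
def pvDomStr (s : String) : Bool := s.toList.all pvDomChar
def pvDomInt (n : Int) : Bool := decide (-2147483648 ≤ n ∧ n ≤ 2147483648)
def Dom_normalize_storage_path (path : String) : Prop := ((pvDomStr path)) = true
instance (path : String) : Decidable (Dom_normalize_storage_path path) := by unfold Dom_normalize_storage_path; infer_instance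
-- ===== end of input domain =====

-- B replaces A's two slash-stripping while-loops and previous-char collapse state machine by a
-- single split / drop-empty-tokens / join pass (measured faster in a timing run).

-- ===== PORT A =====
-- while len(path) > 0 and path[0] == "/": path = path[1:]
def pyA_trimL : List Char → List Char
  | [] => []
  | c :: r => if c = '/' then pyA_trimL r else c :: r

-- while len(path) > 0 and path[-1] == "/": path = path[:-1]   (path[-1] = getLast?, path[:-1] = dropLast)
def pyA_trimR (l : List Char) : List Char :=
  if l.getLast? = some '/' then pyA_trimR l.dropLast else l
termination_by l.length
decreasing_by
  rename_i h
  cases l with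
  | nil => simp at h
  | cons a t => simp

def normalize_storage_path (path : String) : String :=
  if path.toList ≠ [] then
    -- path = path.replace("\\", "/")
    let p1 := PySem.Chars.replace path.toList ['\\'] ['/']
    let p2 := pyA_trimR (pyA_trimL p1)
    -- previous_char = None; collapsed = ""; for char in path: …
    let st := p2.foldl
      (fun (st : Option Char × List Char) c =>
        (some c, if c = '/' ∧ st.1 = some '/' then st.2 else st.2 ++ [c]))
      (none, [])
    let p3 := st.2
    let segments := PySem.Chars.splitOn p3 ['/']
    if segments.any (fun s => decide (s = ['.'] ∨ s = ['.', '.'])) then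
      ""  -- raise ValueError("path containing '.' or '..' segment not allowed"): excluded by Pre_
    else String.ofList p3
  else ""

-- ===== PORT B =====
def normalize_storage_path_alt (path : String) : String :=
  if path.toList ≠ [] then
    let parts := (PySem.Chars.splitOn (PySem.Chars.replace path.toList ['\\'] ['/']) ['/']).filter
      (fun s => s ≠ [])
    if parts.any (fun s => decide (s = ['.'] ∨ s = ['.', '.'])) then
      ""  -- raise ValueError("path containing '.' or '..' segment not allowed"): excluded by Pre_
    else String.ofList (PySem.Chars.join ['/'] parts)
  else ""

-- ===== PRECONDITION & SPEC =====
-- Pre_ excludes exactly the inputs on which A raises ValueError: paths with a '.' or '..'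
-- segment (after backslash conversion); B raises the same ValueError there.
def Pre_normalize_storage_path (path : String) : Prop :=
  ∀ s ∈ PySem.Chars.splitOn (PySem.Chars.replace path.toList ['\\'] ['/']) ['/'],
    s ≠ ['.'] ∧ s ≠ ['.', '.']
instance (path : String) : Decidable (Pre_normalize_storage_path path) := by
  unfold Pre_normalize_storage_path; infer_instance

def pvWitness_normalize_storage_path : String := "a//b\\c/"

def Spec_normalize_storage_path (path : String) (out : String) : Prop := out = normalize_storage_path_alt path
instance (path : String) (out : String) : Decidable (Spec_normalize_storage_path path out) := by unfold Spec_normalize_storage_path; infer_instance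

-- ===== CLAIM (what is proved, stated in full; the proofs are below) =====
def Claim_equal_normalize_storage_path : Prop := ∀ (path : String), Dom_normalize_storage_path path → Pre_normalize_storage_path path → Spec_normalize_storage_path path (normalize_storage_path path)

-- ===== LEMMAS AND PROOFS =====

-- recursive model of PySem.Chars.splitOn on the single-char separator '/'
def mySplit (cur : List Char) : List Char → List (List Char)
  | [] => [cur.reverse]
  | c :: r => if c = '/' then cur.reverse :: mySplit [] r else mySplit (c :: cur) r

-- the nonempty '/'-separated tokens of a string
def tokens : List Char → List (List Char)
  | [] => []
  | c :: r =>
    if c = '/' then tokens r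
    else (c :: r.takeWhile (· ≠ '/')) :: tokens (r.dropWhile (· ≠ '/'))
termination_by l => l.length
decreasing_by
  · simp
  · have := List.length_dropWhile_le (p := fun c => decide (c ≠ '/')) (l := r)
    simp only [List.length_cons]; omega

-- recursive model of A's collapse fold
def colAux (p : Option Char) : List Char → List Char
  | [] => []
  | c :: r => if c = '/' ∧ p = some '/' then colAux (some c) r else c :: colAux (some c) r

theorem splitOn_go_eq (fuel : Nat) (l cur : List Char) (acc : List (List Char)) (h : l.length ≤ fuel) :
    PySem.Chars.splitOn.go ['/'] fuel l cur acc = acc.reverse ++ mySplit cur l := by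
  induction fuel generalizing l cur acc with
  | zero =>
    have : l = [] := by cases l <;> simp_all
    subst this
    simp [PySem.Chars.splitOn.go, mySplit]
  | succ n ih =>
    cases l with
    | nil => simp [PySem.Chars.splitOn.go, mySplit]
    | cons c rest =>
      by_cases hc : c = '/'
      · subst hc
        have hp : List.isPrefixOf ['/'] ('/' :: rest) = true := by
          simp [List.isPrefixOf]
        simp only [PySem.Chars.splitOn.go, hp, if_pos]
        simp only [List.length_cons, List.length_nil, List.drop_succ_cons, List.drop_zero]
        rw [ih _ _ _ (by simp only [List.length_cons] at h; omega)]
        simp [mySplit]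
      · have hp : List.isPrefixOf ['/'] (c :: rest) = false := by
          simp [List.isPrefixOf]
          exact fun he => hc he.symm
        simp only [PySem.Chars.splitOn.go, hp, Bool.false_eq_true, if_neg, not_false_iff]
        rw [ih _ _ _ (by simp only [List.length_cons] at h; omega)]
        simp [mySplit, hc]

theorem splitOn_eq (l : List Char) : PySem.Chars.splitOn l ['/'] = mySplit [] l := by
  rw [PySem.Chars.splitOn, splitOn_go_eq _ _ _ _ (by omega)]
  simp

theorem mySplit_acc (l : List Char) (cur : List Char) :
    mySplit cur l = (mySplit [] l).modifyHead (cur.reverse ++ ·) := by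
  induction l generalizing cur with
  | nil => simp [mySplit]
  | cons c r ih =>
    by_cases hc : c = '/'
    · subst hc; simp [mySplit]
    · simp only [mySplit, hc, if_false]
      rw [ih (c :: cur), ih [c]]
      cases hr : mySplit [] r with
      | nil => simp
      | cons t rest => simp [List.modifyHead]

theorem split_head (l : List Char) :
    mySplit [] l = l.takeWhile (· ≠ '/') ::
      (match l.dropWhile (· ≠ '/') with
        | [] => []
        | _ :: r => mySplit [] r) := by
  induction l with
  | nil => simp [mySplit]
  | cons c r ih =>
    by_cases hc : c = '/'
    · subst hc; simp [mySplit, List.takeWhile, List.dropWhile]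
    · have h1 : mySplit [] (c :: r) = (mySplit [] r).modifyHead ([c] ++ ·) := by
        simp only [mySplit, hc, if_false]
        simpa using mySplit_acc r [c]
      rw [h1, ih]
      simp [List.takeWhile_cons, List.dropWhile_cons, hc, List.modifyHead]

theorem filter_mySplit (l : List Char) :
    (mySplit [] l).filter (· ≠ []) = tokens l := by
  induction hn : l.length using Nat.strong_induction_on generalizing l with
  | _ n ih =>
  subst hn
  rw [split_head]
  cases hd : l.dropWhile (· ≠ '/') with
  | nil =>
    cases l with
    | nil => simp [tokens]
    | cons c r =>
      have hc : c ≠ '/' := by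
        intro he
        simp [List.dropWhile_cons, he] at hd
      rw [List.filter_cons]
      have hdr : r.dropWhile (· ≠ '/') = [] := by
        simpa [List.dropWhile_cons, hc] using hd
      simp only [ne_eq, decide_not] at hdr
      simp [tokens, hc, List.takeWhile_cons, hdr]
  | cons x r2 =>
    have hx : x = '/' := by
      have h2 := List.head?_dropWhile_not (fun c => decide (c ≠ '/')) l
      rw [hd] at h2
      simpa using h2
    have hlen : r2.length < l.length := by
      have h1 : (l.dropWhile (· ≠ '/')).length ≤ l.length := List.length_dropWhile_le _ _
      rw [hd] at h1
      simp only [List.length_cons] at h1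
      have hne : l ≠ [] := by intro he; simp [he] at hd
      omega
    rw [List.filter_cons]
    rw [ih r2.length hlen r2 rfl]
    cases l with
    | nil => simp at hd
    | cons c r =>
      by_cases hc : c = '/'
      · subst hc
        have hp : '/' = x ∧ r = r2 := by simpa [List.dropWhile_cons] using hd
        obtain ⟨-, h2⟩ := hp
        subst h2
        simp [tokens, List.takeWhile_cons]
      · have hdr : r.dropWhile (· ≠ '/') = x :: r2 := by
          simpa [List.dropWhile_cons, hc] using hd
        subst hx
        simp only [ne_eq, decide_not] at hdr
        simp [tokens, hc, List.takeWhile_cons, hdr]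

theorem tokens_props (l : List Char) : ∀ s ∈ tokens l, s ≠ [] ∧ '/' ∉ s := by
  induction hn : l.length using Nat.strong_induction_on generalizing l with
  | _ n ih =>
  subst hn
  cases l with
  | nil => simp [tokens]
  | cons c r =>
    by_cases hc : c = '/'
    · subst hc
      have h1 : tokens ('/' :: r) = tokens r := by simp [tokens]
      rw [h1]
      exact ih r.length (by simp) r rfl
    · simp only [tokens, hc, if_false]
      intro s hs
      rcases List.mem_cons.mp hs with h | h
      · subst h
        refine ⟨by simp, ?_⟩
        intro hm
        rcases List.mem_cons.mp hm with h' | h'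
        · exact hc h'.symm
        · have := List.mem_takeWhile_imp h'
          simp at this
      · have hlen : (r.dropWhile (· ≠ '/')).length < (c :: r).length := by
          have := List.length_dropWhile_le (p := fun c => decide (c ≠ '/')) (l := r)
          simp only [List.length_cons]; omega
        exact ih _ hlen _ rfl s h

theorem tokens_nil_iff (l : List Char) : tokens l = [] ↔ l.all (· == '/') := by
  induction hn : l.length using Nat.strong_induction_on generalizing l with
  | _ n ih =>
  subst hn
  cases l with
  | nil => simp [tokens]
  | cons c r =>
    by_cases hc : c = '/'
    · subst hc
      have h1 : tokens ('/' :: r) = tokens r := by simp [tokens]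
      rw [h1, ih r.length (by simp) r rfl]
      simp
    · simp [tokens, hc]

theorem tokens_cons_slash (r : List Char) : tokens ('/' :: r) = tokens r := by
  rw [tokens]; simp

theorem tokens_cons_ne (c : Char) (r : List Char) (hc : c ≠ '/') :
    tokens (c :: r) = (c :: r.takeWhile (· ≠ '/')) :: tokens (r.dropWhile (· ≠ '/')) := by
  rw [tokens, if_neg hc]

theorem tw_free (r : List Char) (h : '/' ∉ r) (X : List Char) :
    (r ++ '/' :: X).takeWhile (· ≠ '/') = r ∧ (r ++ '/' :: X).dropWhile (· ≠ '/') = '/' :: X := by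
  induction r with
  | nil =>
    constructor
    · rw [List.nil_append, List.takeWhile_cons, if_neg (by simp)]
    · rw [List.nil_append, List.dropWhile_cons, if_neg (by simp)]
  | cons c r ih =>
    have hc : c ≠ '/' := fun he => h (by simp [he])
    have hr := ih (fun hm => h (List.mem_cons_of_mem _ hm))
    constructor
    · rw [List.cons_append, List.takeWhile_cons, if_pos (by simpa using hc), hr.1]
    · rw [List.cons_append, List.dropWhile_cons, if_pos (by simpa using hc), hr.2]

theorem tw_free2 (r : List Char) (h : '/' ∉ r) :
    r.takeWhile (· ≠ '/') = r ∧ r.dropWhile (· ≠ '/') = [] := by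
  induction r with
  | nil => simp
  | cons c r ih =>
    have hc : c ≠ '/' := fun he => h (by simp [he])
    have hr := ih (fun hm => h (List.mem_cons_of_mem _ hm))
    constructor
    · rw [List.takeWhile_cons, if_pos (by simpa using hc), hr.1]
    · rw [List.dropWhile_cons, if_pos (by simpa using hc), hr.2]

theorem tokens_single (p : List Char) (hne : p ≠ []) (hf : '/' ∉ p) : tokens p = [p] := by
  cases p with
  | nil => exact absurd rfl hne
  | cons c r =>
    have hc : c ≠ '/' := fun he => hf (by simp [he])
    have hr : '/' ∉ r := fun hm => hf (List.mem_cons_of_mem _ hm)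
    rw [tokens_cons_ne c r hc, (tw_free2 r hr).1, (tw_free2 r hr).2]
    simp [tokens]

theorem tokens_prefix (p X : List Char) (hne : p ≠ []) (hf : '/' ∉ p) :
    tokens (p ++ '/' :: X) = p :: tokens X := by
  cases p with
  | nil => exact absurd rfl hne
  | cons c r =>
    have hc : c ≠ '/' := fun he => hf (by simp [he])
    have hr : '/' ∉ r := fun hm => hf (List.mem_cons_of_mem _ hm)
    rw [List.cons_append, tokens_cons_ne _ _ hc, (tw_free r hr X).1, (tw_free r hr X).2,
      tokens_cons_slash]

theorem tokens_join (parts : List (List Char)) (h : ∀ s ∈ parts, s ≠ [] ∧ '/' ∉ s) :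
    tokens (PySem.Chars.join ['/'] parts) = parts := by
  induction parts with
  | nil => simp [PySem.Chars.join, List.intercalate, tokens]
  | cons p rest ih =>
    cases rest with
    | nil =>
      rw [PySem.Chars.join_singleton]
      exact tokens_single p (h p (by simp)).1 (h p (by simp)).2
    | cons q rest2 =>
      rw [PySem.Chars.join_cons_cons, List.append_assoc, List.singleton_append]
      rw [tokens_prefix p _ (h p (by simp)).1 (h p (by simp)).2]
      rw [ih (fun s hs => h s (List.mem_cons_of_mem _ hs))]

theorem trimL_eq (l : List Char) : pyA_trimL l = l.dropWhile (· = '/') := by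
  induction l with
  | nil => rfl
  | cons c r ih =>
    by_cases hc : c = '/'
    · rw [pyA_trimL, if_pos hc, List.dropWhile_cons, if_pos (by simpa using hc), ih]
    · rw [pyA_trimL, if_neg hc, List.dropWhile_cons, if_neg (by simpa using hc)]

theorem trimR_eq (l : List Char) : pyA_trimR l = (l.reverse.dropWhile (· = '/')).reverse := by
  induction hn : l.length using Nat.strong_induction_on generalizing l with
  | _ n ih =>
  subst hn
  by_cases h : l.getLast? = some '/'
  · have hne : l ≠ [] := by intro he; subst he; simp at h
    have hsplit : l = l.dropLast ++ ['/'] := by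
      conv_lhs => rw [← List.dropLast_concat_getLast hne]
      rw [List.getLast?_eq_getLast hne] at h
      simp only [Option.some.injEq] at h
      rw [h]
    rw [pyA_trimR, if_pos h]
    have hlen : l.dropLast.length < l.length := by
      cases l with
      | nil => exact absurd rfl hne
      | cons a t => simp
    rw [ih _ hlen _ rfl]
    conv_rhs => rw [hsplit]
    rw [List.reverse_append]
    simp [List.dropWhile_cons]
  · rw [pyA_trimR, if_neg h]
    cases hl : l.reverse with
    | nil => simp [List.reverse_eq_nil_iff.mp hl]
    | cons c t =>
      have hc : l.getLast? = some c := by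
        rw [← List.head?_reverse, hl]; rfl
      have hcne : c ≠ '/' := by intro he; rw [he] at hc; exact h hc
      rw [List.dropWhile_cons, if_neg (by simpa using hcne), ← hl]
      simp

theorem trimR_cons (c : Char) (r : List Char) :
    pyA_trimR (c :: r) =
      if r.all (· == '/') then (if c = '/' then [] else [c]) else c :: pyA_trimR r := by
  rw [trimR_eq, trimR_eq]
  rw [List.reverse_cons, List.dropWhile_append]
  by_cases hall : r.all (· == '/')
  · have hnil : r.reverse.dropWhile (· = '/') = [] := by
      rw [List.dropWhile_eq_nil_iff]
      intro x hx
      have := List.all_eq_true.mp hall x (List.mem_reverse.mp hx)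
      simpa using this
    rw [if_pos (by simp [hnil]), if_pos hall]
    by_cases hc : c = '/'
    · rw [List.dropWhile_cons, if_pos (by simpa using hc)]
      simp [hc]
    · rw [List.dropWhile_cons, if_neg (by simpa using hc)]
      simp [hc]
  · have hnnil : r.reverse.dropWhile (· = '/') ≠ [] := by
      rw [Ne, List.dropWhile_eq_nil_iff]
      intro hx
      exact hall (List.all_eq_true.mpr (fun x hm => by
        simpa using hx x (List.mem_reverse.mpr hm)))
    rw [if_neg (by simpa using hnnil), if_neg hall]
    simp

theorem trimL_allslash (l : List Char) (h : l.all (· == '/')) : pyA_trimL l = [] := by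
  rw [trimL_eq, List.dropWhile_eq_nil_iff]
  intro x hx
  simpa using List.all_eq_true.mp h x hx

theorem trimR_nil : pyA_trimR [] = [] := by
  rw [pyA_trimR]; simp

theorem trimL_trimR_comm (l : List Char) : pyA_trimL (pyA_trimR l) = pyA_trimR (pyA_trimL l) := by
  induction l with
  | nil => simp [pyA_trimL, trimR_nil]
  | cons c r ih =>
    by_cases hc : c = '/'
    · subst hc
      rw [trimR_cons]
      by_cases hall : r.all (· == '/')
      · rw [if_pos hall, if_pos rfl]
        have h1 : pyA_trimL ('/' :: r) = [] := trimL_allslash _ (by simp [hall])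
        rw [h1, trimR_nil]
        rfl
      · rw [if_neg hall]
        have h2 : pyA_trimL ('/' :: pyA_trimR r) = pyA_trimL (pyA_trimR r) := by
          rw [pyA_trimL, if_pos rfl]
        have h3 : pyA_trimL ('/' :: r) = pyA_trimL r := by
          rw [pyA_trimL, if_pos rfl]
        rw [h2, h3, ih]
    · have h4 : pyA_trimL (c :: r) = c :: r := by rw [pyA_trimL, if_neg hc]
      rw [h4, trimR_cons]
      by_cases hall : r.all (· == '/')
      · rw [if_pos hall, if_neg hc]
        rw [pyA_trimL, if_neg hc]
      · rw [if_neg hall]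
        rw [pyA_trimL, if_neg hc]

theorem colAux_ne (c : Char) (hc : c ≠ '/') (l : List Char) :
    colAux (some c) l = colAux none l := by
  cases l with
  | nil => rfl
  | cons d r => simp [colAux, hc]

theorem colAux_slash (l : List Char) : colAux (some '/') l = colAux none (pyA_trimL l) := by
  induction l with
  | nil => rfl
  | cons c r ih =>
    by_cases hc : c = '/'
    · subst hc
      rw [pyA_trimL, if_pos rfl, ← ih]
      simp [colAux]
    · rw [pyA_trimL, if_neg hc]
      simp [colAux, hc]

theorem foldl_collapse (l : List Char) (p : Option Char) (acc : List Char) :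
    (l.foldl (fun (st : Option Char × List Char) c =>
        (some c, if c = '/' ∧ st.1 = some '/' then st.2 else st.2 ++ [c])) (p, acc)).2
      = acc ++ colAux p l := by
  induction l generalizing p acc with
  | nil => simp [colAux]
  | cons c r ih =>
    rw [List.foldl_cons, ih]
    by_cases hcp : c = '/' ∧ p = some '/'
    · simp only [colAux, if_pos hcp]
    · simp only [colAux, if_neg hcp]
      simp

theorem join_cons_head (c : Char) (t : List Char) (rest : List (List Char)) :
    PySem.Chars.join ['/'] ((c :: t) :: rest) = c :: PySem.Chars.join ['/'] (t :: rest) := by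
  cases rest with
  | nil => rw [PySem.Chars.join_singleton, PySem.Chars.join_singleton]
  | cons q r2 => rw [PySem.Chars.join_cons_cons, PySem.Chars.join_cons_cons]; simp

theorem main_eq (l : List Char) :
    colAux none (pyA_trimR (pyA_trimL l)) = PySem.Chars.join ['/'] (tokens l) := by
  induction hn : l.length using Nat.strong_induction_on generalizing l with
  | _ n ih =>
  subst hn
  cases l with
  | nil => simp [pyA_trimL, trimR_nil, colAux, tokens, PySem.Chars.join_nil]
  | cons c r =>
    by_cases hc : c = '/'
    · subst hc
      rw [pyA_trimL, if_pos rfl, tokens_cons_slash]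
      exact ih r.length (by simp) r rfl
    · rw [pyA_trimL, if_neg hc, trimR_cons, if_neg hc, tokens_cons_ne c r hc]
      by_cases hall : r.all (· == '/')
      · rw [if_pos hall]
        have htw : r.takeWhile (· ≠ '/') = [] ∧ r.dropWhile (· ≠ '/') = r := by
          cases r with
          | nil => simp
          | cons d t =>
            have hd : d = '/' := by simpa using List.all_eq_true.mp hall d (by simp)
            constructor
            · rw [List.takeWhile_cons, if_neg (by simp [hd])]
            · rw [List.dropWhile_cons, if_neg (by simp [hd])]
        rw [htw.1, htw.2, (tokens_nil_iff r).mpr hall, PySem.Chars.join_singleton]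
        simp [colAux]
      · rw [if_neg hall]
        have hstep : colAux none (c :: pyA_trimR r) = c :: colAux none (pyA_trimR r) := by
          simp [colAux, colAux_ne c hc]
        rw [hstep]
        cases r with
        | nil => simp at hall
        | cons d r2 =>
          by_cases hd : d = '/'
          · subst hd
            have hall2 : ¬ r2.all (· == '/') := by
              intro h2; exact hall (by simp [h2])
            have htr : pyA_trimR ('/' :: r2) = '/' :: pyA_trimR r2 := by
              rw [trimR_cons, if_neg hall2]
            rw [htr]
            have hcol : colAux none ('/' :: pyA_trimR r2) = '/' :: colAux (some '/') (pyA_trimR r2) := by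
              simp [colAux]
            rw [hcol, colAux_slash, trimL_trimR_comm]
            rw [ih r2.length (by simp) r2 rfl]
            have htw1 : (('/' : Char) :: r2).takeWhile (· ≠ '/') = [] := by
              rw [List.takeWhile_cons, if_neg (by simp)]
            have htw2 : (('/' : Char) :: r2).dropWhile (· ≠ '/') = '/' :: r2 := by
              rw [List.dropWhile_cons, if_neg (by simp)]
            rw [htw1, htw2, tokens_cons_slash]
            cases ht : tokens r2 with
            | nil =>
              exact absurd ((tokens_nil_iff r2).mp ht) hall2
            | cons t ts =>
              rw [PySem.Chars.join_cons_cons]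
              simp
          · have htrl : pyA_trimL (d :: r2) = d :: r2 := by rw [pyA_trimL, if_neg hd]
            have hihr := ih (d :: r2).length (by simp) (d :: r2) rfl
            rw [htrl] at hihr
            rw [hihr]
            have htw1 : (d :: r2).takeWhile (· ≠ '/') = d :: r2.takeWhile (· ≠ '/') := by
              rw [List.takeWhile_cons, if_pos (by simpa using hd)]
            have htw2 : (d :: r2).dropWhile (· ≠ '/') = r2.dropWhile (· ≠ '/') := by
              rw [List.dropWhile_cons, if_pos (by simpa using hd)]
            rw [htw1, htw2, tokens_cons_ne d r2 hd]
            rw [join_cons_head c (d :: r2.takeWhile (· ≠ '/'))]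

-- ===== VERDICT (by name: the statement is the Claim_ definition above) =====
theorem normalize_storage_path_spec : Claim_equal_normalize_storage_path := by
  intro path _ hpre
  unfold Spec_normalize_storage_path
  unfold Pre_normalize_storage_path at hpre
  by_cases hne : path.toList = []
  · simp [normalize_storage_path, normalize_storage_path_alt, hne]
  · have hne' : path.toList ≠ [] := hne
    set cs := PySem.Chars.replace path.toList ['\\'] ['/'] with hcs
    have hparts : (PySem.Chars.splitOn cs ['/']).filter (fun s => s ≠ []) = tokens cs := by
      rw [splitOn_eq, filter_mySplit]
    have hBany : ((PySem.Chars.splitOn cs ['/']).filter (fun s => decide (s ≠ []))).any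
        (fun s => decide (s = ['.'] ∨ s = ['.', '.'])) = false := by
      rw [List.any_eq_false]
      intro s hs
      have hm := List.mem_of_mem_filter hs
      have h2 := hpre s hm
      simp [h2.1, h2.2]
    have hA3 : ((pyA_trimR (pyA_trimL cs)).foldl
        (fun (st : Option Char × List Char) c =>
          (some c, if c = '/' ∧ st.1 = some '/' then st.2 else st.2 ++ [c])) (none, [])).2
        = PySem.Chars.join ['/'] (tokens cs) := by
      rw [foldl_collapse]
      simpa using main_eq cs
    have hAany : (PySem.Chars.splitOn (PySem.Chars.join ['/'] (tokens cs)) ['/']).any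
        (fun s => decide (s = ['.'] ∨ s = ['.', '.'])) = false := by
      rw [List.any_eq_false]
      intro s hs
      simp only [decide_eq_true_eq]
      intro hdot
      have hsne : s ≠ [] := by rcases hdot with h | h <;> simp [h]
      have hs1 : s ∈ (mySplit [] (PySem.Chars.join ['/'] (tokens cs))).filter (fun s => decide (s ≠ [])) := by
        refine List.mem_filter.mpr ⟨?_, by simpa using hsne⟩
        rw [← splitOn_eq]
        exact hs
      rw [filter_mySplit, tokens_join _ (tokens_props cs)] at hs1
      have hs2 : s ∈ PySem.Chars.splitOn cs ['/'] := by
        rw [splitOn_eq]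
        have := (filter_mySplit cs).symm ▸ hs1
        exact List.mem_of_mem_filter this
      have h3 := hpre s hs2
      rcases hdot with h | h
      · exact h3.1 h
      · exact h3.2 h
    simp only [normalize_storage_path, normalize_storage_path_alt, ← hcs]
    rw [if_pos hne', if_pos hne']
    simp only [hA3, hAany, hparts]
    have hTok : ((tokens cs).any fun s => decide (s = ['.'] ∨ s = ['.', '.'])) = false := by
      rw [← hparts]; exact hBany
    rw [hTok]
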